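-- pv_equiv track=rewrite | github.com/Russel-hunho/code_codingtest | programmers_옹알이2.py | solution
-- ===== SOURCE A (Python) =====
-- def solution(babbling):
--     answer = 0
--     joka_2 = ["ye","ma"]
--     joka_3 = ["aya","woo"]
--     for i in range(len(babbling)):
--         bibap = "k"
--         while True:
--             if babbling[i] == "":
--                 answer += 1
--                 break
--             elif len(babbling[i]) == 1:
--                 break
--             elif len(babbling[i]) == 2:
--                 if (babbling[i] not in joka_2) or (babbling[i] == bibap):
--                     break
--                 else:
--                     answer += 1
--                     break
--             elif (babbling[i][0:2] in joka_2) and (babbling[i] != bibap):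
--                 bibab = babbling[i][0:2]
--                 babbling[i] = babbling[i][2:]
--             elif (babbling[i][0:3] in joka_3) and (babbling[i] != bibap):
--                 bibab = babbling[i][0:3]
--                 babbling[i] = babbling[i][3:]
--             else:
--                 break
--     return answer
-- ===== SOURCE B (Python) =====
-- def solution(babbling):
--     count = 0
--     for word in babbling:
--         i, n, ok = 0, len(word), True
--         while i < n:
--             if word.startswith("ye", i) or word.startswith("ma", i):
--                 i += 2
--             elif word.startswith("aya", i) or word.startswith("woo", i):
--                 i += 3
--             else:
--                 ok = False
--                 break
--         if ok:
--             count += 1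
--     return count
-- ===== Notes on version B (the rewrite author's own statement) =====
-- stated objective: alternative
-- what changed: Replaces A's while-loop that repeatedly reslices and reassigns the mutable string (babbling[i] = babbling[i][2:], with length-case branches) by a single forward index scan per word that only tests fixed-length prefixes at the current position, never building new strings.
import Mathlib
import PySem

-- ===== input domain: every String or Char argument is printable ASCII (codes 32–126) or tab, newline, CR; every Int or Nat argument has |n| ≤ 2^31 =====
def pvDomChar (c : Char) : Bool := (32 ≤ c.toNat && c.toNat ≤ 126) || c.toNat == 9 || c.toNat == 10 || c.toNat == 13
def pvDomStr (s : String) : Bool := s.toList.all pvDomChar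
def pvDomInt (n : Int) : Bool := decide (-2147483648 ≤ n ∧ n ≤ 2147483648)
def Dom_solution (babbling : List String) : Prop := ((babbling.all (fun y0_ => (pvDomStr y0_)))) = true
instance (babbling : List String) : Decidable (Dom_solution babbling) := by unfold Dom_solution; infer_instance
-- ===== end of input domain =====

-- B replaces A's repeated string reslicing by a single index scan per word (alternative decomposition, not measured faster).
-- A mutates its list argument in place (babbling[i] = babbling[i][2:]); the equivalence
-- proved here is about the RETURN value only (B does not mutate).

-- ===== PORT A =====
-- joka_2 / joka_3 from A, as char lists (strings are worked with as List Char throughout).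
def joka2 : List (List Char) := [['y','e'], ['m','a']]
def joka3 : List (List Char) := [['a','y','a'], ['w','o','o']]

-- A's inner 'while True' over the mutable string babbling[i]; bibap is carried unchanged
-- ("k" forever — A assigns the misspelled 'bibab'); returns the contribution to answer (1 or 0).
-- s[0:2] / s[2:] on a string with nonnegative literal bounds are exactly take / drop.
def loopA (s : List Char) (bibap : List Char) : Int :=
  if s = [] then 1
  else if s.length = 1 then 0
  else if s.length = 2 then
    if ¬ (joka2.contains s = true) ∨ s = bibap then 0 else 1
  else if joka2.contains (s.take 2) = true ∧ ¬ s = bibap then loopA (s.drop 2) bibap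
  else if joka3.contains (s.take 3) = true ∧ ¬ s = bibap then loopA (s.drop 3) bibap
  else 0
termination_by s.length
decreasing_by
  · simp only [List.length_drop]
    rename_i h1 _h2 _h3 _h4
    have : s.length ≠ 0 := by simpa [List.length_eq_zero_iff] using h1
    omega
  · simp only [List.length_drop]
    rename_i h1 _h2 _h3 _h4 _h5
    have : s.length ≠ 0 := by simpa [List.length_eq_zero_iff] using h1
    omega

def solution (babbling : List String) : Int :=
  babbling.foldl (fun answer w => answer + loopA w.toList ['k']) 0

-- ===== PORT B =====
-- Source B's inner while loop: forward index scan. word.startswith(p, i) with i : Nat is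
-- exactly (toList.drop i).take p.length == p.toList (beyond the end take yields a shorter
-- list, which compares unequal, as startswith returns False there).
def okLoop (s : List Char) (i : Nat) : Bool :=
  if i < s.length then
    if (s.drop i).take 2 = ['y','e'] ∨ (s.drop i).take 2 = ['m','a'] then
      okLoop s (i + 2)
    else if (s.drop i).take 3 = ['a','y','a'] ∨ (s.drop i).take 3 = ['w','o','o'] then
      okLoop s (i + 3)
    else false
  else true
termination_by s.length - i

def solution_alt (babbling : List String) : Int :=
  babbling.foldl (fun count w => count + (if okLoop w.toList 0 then 1 else 0)) 0

-- ===== PRECONDITION & SPEC =====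
def Spec_solution (babbling : List String) (out : Int) : Prop := out = solution_alt babbling
instance (babbling : List String) (out : Int) : Decidable (Spec_solution babbling out) := by unfold Spec_solution; infer_instance

-- ===== CLAIM (what is proved, stated in full; the proofs are below) =====
def Claim_equal_solution : Prop := ∀ (babbling : List String), Dom_solution babbling → Spec_solution babbling (solution babbling)

-- ===== LEMMAS AND PROOFS =====

-- Both loops recognise the same language: words decomposable into ye/ma/aya/woo.
def okRec : List Char → Bool
  | [] => true
  | 'y' :: 'e' :: r => okRec r
  | 'm' :: 'a' :: r => okRec r
  | 'a' :: 'y' :: 'a' :: r => okRec r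
  | 'w' :: 'o' :: 'o' :: r => okRec r
  | _ => false

theorem okRec_ye (r : List Char) : okRec ('y' :: 'e' :: r) = okRec r := rfl
theorem okRec_ma (r : List Char) : okRec ('m' :: 'a' :: r) = okRec r := rfl
theorem okRec_aya (r : List Char) : okRec ('a' :: 'y' :: 'a' :: r) = okRec r := rfl
theorem okRec_woo (r : List Char) : okRec ('w' :: 'o' :: 'o' :: r) = okRec r := rfl

theorem take_two_eq {l : List Char} {a b : Char} (h : l.take 2 = [a, b]) :
    l = a :: b :: l.drop 2 := by
  match l with
  | [] => simp at h
  | [_] => simp at h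
  | x :: y :: t => simp_all

theorem take_three_eq {l : List Char} {a b c : Char} (h : l.take 3 = [a, b, c]) :
    l = a :: b :: c :: l.drop 3 := by
  match l with
  | [] => simp at h
  | [_] => simp at h
  | [_, _] => simp at h
  | x :: y :: z :: t => simp_all

theorem okLoop_eq_okRec (s : List Char) (i : Nat) : okLoop s i = okRec (s.drop i) := by
  fun_induction okLoop s i with
  | case1 i hlt h2 ih =>
    rw [ih]
    have hdd : (s.drop i).drop 2 = s.drop (i + 2) := by
      rw [List.drop_drop]
    rcases h2 with h | h
    · have hd := take_two_eq h
      rw [hdd] at hd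
      rw [hd, okRec_ye]
    · have hd := take_two_eq h
      rw [hdd] at hd
      rw [hd, okRec_ma]
  | case2 i hlt h2 h3 ih =>
    rw [ih]
    have hdd : (s.drop i).drop 3 = s.drop (i + 3) := by
      rw [List.drop_drop]
    rcases h3 with h | h
    · have hd := take_three_eq h
      rw [hdd] at hd
      rw [hd, okRec_aya]
    · have hd := take_three_eq h
      rw [hdd] at hd
      rw [hd, okRec_woo]
  | case3 i hlt h2 h3 =>
    have hne : s.drop i ≠ [] := by
      simp only [ne_eq, List.drop_eq_nil_iff]; omega
    rw [okRec.eq_def]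
    split <;> simp_all
  | case4 i h =>
    have hnil : s.drop i = [] := by
      simp only [List.drop_eq_nil_iff]; omega
    rw [hnil]
    rfl

theorem loopA_eq_okRec : ∀ (n : Nat) (s : List Char), s.length ≤ n →
    loopA s ['k'] = (if okRec s then 1 else 0) := by
  intro n
  induction n with
  | zero =>
    intro s hs
    have : s = [] := by simpa [List.length_eq_zero_iff] using Nat.le_zero.mp hs
    subst this
    rw [loopA]; rfl
  | succ n ih =>
    intro s hs
    match s with
    | [] => rw [loopA]; rfl
    | [a] =>
      rw [loopA, if_neg (by simp : ¬([a] : List Char) = []),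
        if_pos (by simp : ([a] : List Char).length = 1)]
      have hF : okRec [a] = false := by
        rw [okRec.eq_def]; split <;> simp_all
      rw [hF]; rfl
    | [a, b] =>
      rw [loopA, if_neg (by simp : ¬([a, b] : List Char) = []),
        if_neg (by simp : ¬([a, b] : List Char).length = 1),
        if_pos (by simp : ([a, b] : List Char).length = 2)]
      by_cases h2 : joka2.contains [a, b] = true
      · have hab : (a = 'y' ∧ b = 'e') ∨ (a = 'm' ∧ b = 'a') := by
          simpa [joka2] using h2
        rcases hab with ⟨rfl, rfl⟩ | ⟨rfl, rfl⟩ <;> decide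
      · rw [if_pos (Or.inl h2)]
        have hF : okRec [a, b] = false := by
          rw [okRec.eq_def]; split <;> simp_all [joka2]
        rw [hF]; rfl
    | a :: b :: c :: r =>
      have hne : (a :: b :: c :: r : List Char) ≠ ['k'] := by simp
      rw [loopA, if_neg (by simp : ¬(a :: b :: c :: r : List Char) = []),
        if_neg (by simp : ¬(a :: b :: c :: r : List Char).length = 1),
        if_neg (by simp : ¬(a :: b :: c :: r : List Char).length = 2)]
      by_cases h2 : joka2.contains ((a :: b :: c :: r).take 2) = true
      · rw [if_pos ⟨h2, hne⟩]
        have hab : (a = 'y' ∧ b = 'e') ∨ (a = 'm' ∧ b = 'a') := by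
          simpa [joka2] using h2
        have ihr := ih (c :: r) (by simp at hs ⊢; omega)
        have hdrop : (a :: b :: c :: r).drop 2 = c :: r := rfl
        rw [hdrop]
        rcases hab with ⟨rfl, rfl⟩ | ⟨rfl, rfl⟩
        · rw [okRec_ye]; exact ihr
        · rw [okRec_ma]; exact ihr
      · rw [if_neg (fun h => h2 h.1)]
        by_cases h3 : joka3.contains ((a :: b :: c :: r).take 3) = true
        · rw [if_pos ⟨h3, hne⟩]
          have habc : (a = 'a' ∧ b = 'y' ∧ c = 'a') ∨ (a = 'w' ∧ b = 'o' ∧ c = 'o') := by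
            simpa [joka3] using h3
          have ihr := ih r (by simp at hs ⊢; omega)
          have hdrop : (a :: b :: c :: r).drop 3 = r := rfl
          rw [hdrop]
          rcases habc with ⟨rfl, rfl, rfl⟩ | ⟨rfl, rfl, rfl⟩
          · rw [okRec_aya]; exact ihr
          · rw [okRec_woo]; exact ihr
        · rw [if_neg (fun h => h3 h.1)]
          have hF : okRec (a :: b :: c :: r) = false := by
            rw [okRec.eq_def]; split <;> simp_all [joka2, joka3]
          rw [hF]; rfl

-- ===== VERDICT (by name: the statement is the Claim_ definition above) =====
theorem solution_spec : Claim_equal_solution := by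
  intro babbling _
  unfold Spec_solution solution solution_alt
  refine PySem.List.foldl_congr_mem _ _ _ _ (fun acc w _ => ?_)
  rw [loopA_eq_okRec w.toList.length w.toList le_rfl, okLoop_eq_okRec, List.drop_zero]
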